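-- pv_equiv track=rewrite | github.com/treviusss/AdventOfCode | 2021/day10/day10_part2.py | complemented_lines_score
-- ===== SOURCE A (Python) =====
-- BRACKET_POINTS = {
--     ")": 1,
--     "]": 2,
--     "}": 3,
--     ">": 4,
-- }
--
-- def complemented_lines_score(complemented_list: list) -> list:
--     lines_score = []
--
--     for line in complemented_list:
--         score = 0
--         for bracket in line:
--             score *= 5
--             score += BRACKET_POINTS[bracket]
--         lines_score.append(score)
--
--     return lines_score
-- ===== SOURCE B (Python) =====
-- BRACKET_POINTS = {
--     ")": 1,
--     "]": 2,
--     "}": 3,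
--     ">": 4,
-- }
--
-- def complemented_lines_score(complemented_list: list) -> list:
--     lines_score = []
--     for line in complemented_list:
--         digits = ''.join(str(BRACKET_POINTS[b]) for b in line)
--         lines_score.append(int(digits, 5) if digits else 0)
--     return lines_score
-- ===== Notes on version B (the rewrite author's own statement) =====
-- stated objective: idiomatic
-- what changed: B builds each line's base-5 digit string from the bracket point table and converts it with a single int(digits, 5) call, replacing A's explicit Horner accumulation loop.
import Mathlib
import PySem

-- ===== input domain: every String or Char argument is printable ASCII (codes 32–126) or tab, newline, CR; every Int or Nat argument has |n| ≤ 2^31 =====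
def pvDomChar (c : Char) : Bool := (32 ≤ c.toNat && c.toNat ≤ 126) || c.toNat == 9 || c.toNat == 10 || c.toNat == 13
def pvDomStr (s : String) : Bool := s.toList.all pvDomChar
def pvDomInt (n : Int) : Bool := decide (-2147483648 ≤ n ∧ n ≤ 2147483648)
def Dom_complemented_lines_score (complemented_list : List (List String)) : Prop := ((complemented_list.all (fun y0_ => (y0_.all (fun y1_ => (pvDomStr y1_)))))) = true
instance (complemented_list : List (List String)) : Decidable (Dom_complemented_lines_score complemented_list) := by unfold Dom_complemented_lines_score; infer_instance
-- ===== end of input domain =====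

-- B replaces A's explicit Horner accumulation loop by building each line's base-5
-- digit string and converting it with one int(digits, 5) call (idiomatic; same cost).

-- ===== PORT A =====
def pvBracketPoints : PySem.Dict String Int :=
  PySem.Dict.ofList [(")", 1), ("]", 2), ("}", 3), (">", 4)]

-- get? = none is Python's KeyError; such inputs are excluded by Pre_ below.
def complemented_lines_score (complemented_list : List (List String)) : List Int :=
  complemented_list.foldl
    (fun lines_score line =>
      lines_score ++
        [line.foldl (fun score bracket => score * 5 + (pvBracketPoints.get? bracket).getD 0) 0])
    []

-- ===== PORT B =====
-- ''.join(str(BRACKET_POINTS[b]) for b in line), as a list of chars (exact).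
def pvDigitsOf (line : List String) : List Char :=
  line.foldr (fun b acc => (PySem.Int.toStr ((pvBracketPoints.get? b).getD 0)).toList ++ acc) []

-- hand port of int(digits, 5): exact on strings of digit chars '0'-'4' (the only chars produced)
def pvParse5 (ds : List Char) : Int :=
  ds.foldl (fun acc c => acc * 5 + ((c.toNat : Int) - 48)) 0

def complemented_lines_score_alt (complemented_list : List (List String)) : List Int :=
  complemented_list.map (fun line =>
    let digits := pvDigitsOf line
    if digits.isEmpty then 0 else pvParse5 digits)

-- ===== PRECONDITION & SPEC =====
-- Pre_ excludes lines containing a string that is not one of the four closing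
-- brackets: A raises KeyError on those (the dict lookup fails).
def Pre_complemented_lines_score (complemented_list : List (List String)) : Prop :=
  ∀ line ∈ complemented_list, ∀ b ∈ line, b ∈ [")", "]", "}", ">"]
instance (complemented_list : List (List String)) : Decidable (Pre_complemented_lines_score complemented_list) := by unfold Pre_complemented_lines_score; infer_instance

def pvWitness_complemented_lines_score : List (List String) := [[")", "]"], [">"], []]

def Spec_complemented_lines_score (complemented_list : List (List String)) (out : List Int) : Prop := out = complemented_lines_score_alt complemented_list
instance (complemented_list : List (List String)) (out : List Int) : Decidable (Spec_complemented_lines_score complemented_list out) := by unfold Spec_complemented_lines_score; infer_instance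

-- ===== CLAIM (what is proved, stated in full; the proofs are below) =====
def Claim_equal_complemented_lines_score : Prop := ∀ (complemented_list : List (List String)), Dom_complemented_lines_score complemented_list → Pre_complemented_lines_score complemented_list → Spec_complemented_lines_score complemented_list (complemented_lines_score complemented_list)

-- ===== LEMMAS AND PROOFS =====

-- parsing the digit string of a line Horner-style equals A's direct Horner loop,
-- for any starting accumulator
lemma pvParse5_digits (line : List String)
    (h : ∀ b ∈ line, b ∈ [")", "]", "}", ">"]) (acc : Int) :
    (pvDigitsOf line).foldl (fun a c => a * 5 + ((c.toNat : Int) - 48)) acc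
      = line.foldl (fun score b => score * 5 + (pvBracketPoints.get? b).getD 0) acc := by
  induction line generalizing acc with
  | nil => rfl
  | cons b rest ih =>
    have hb : b ∈ [")", "]", "}", ">"] := h b (List.mem_cons_self ..)
    have hrest : ∀ x ∈ rest, x ∈ [")", "]", "}", ">"] :=
      fun x hx => h x (List.mem_cons_of_mem _ hx)
    have hdig : pvDigitsOf (b :: rest)
        = (PySem.Int.toStr ((pvBracketPoints.get? b).getD 0)).toList ++ pvDigitsOf rest := rfl
    rw [hdig, List.foldl_append]
    fin_cases hb <;> simp only [List.foldl_cons] <;> exact ih hrest _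

lemma pvLine_score (line : List String)
    (h : ∀ b ∈ line, b ∈ [")", "]", "}", ">"]) :
    (if (pvDigitsOf line).isEmpty then 0 else pvParse5 (pvDigitsOf line))
      = line.foldl (fun score b => score * 5 + (pvBracketPoints.get? b).getD 0) 0 := by
  by_cases he : (pvDigitsOf line).isEmpty
  · rw [if_pos he]
    rw [← pvParse5_digits line h 0]
    rw [List.isEmpty_iff] at he
    rw [he]; rfl
  · rw [if_neg he]
    exact pvParse5_digits line h 0

-- ===== VERDICT (by name: the statement is the Claim_ definition above) =====
theorem complemented_lines_score_spec : Claim_equal_complemented_lines_score := by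
  intro l _ hpre
  unfold Spec_complemented_lines_score complemented_lines_score complemented_lines_score_alt
  rw [PySem.List.foldl_append_singleton_eq_map]
  exact List.map_congr_left fun line hl => (pvLine_score line (hpre line hl)).symm
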